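-- pv_equiv track=rewrite | github.com/theodubus/pdf2book | distribution.py | distribution_booklets
-- ===== SOURCE A (Python) =====
-- def distribution_booklets(n_pages, n_booklets="auto", n_sheets=7):
--     """
--     Defines which pages go in which booklet.
--     """
--
--     if type(n_pages) is not int or n_pages <= 0:
--         raise TypeError("number of pages must be integer greater than 0")
--
--     if n_booklets == "auto":
--         n_booklets = n_pages // (4 * n_sheets)  # average of n_sheets sheets of 4 pages each per booklet
--
--         if n_booklets == 0:
--             raise ValueError("Too many sheets")
--
--         if n_pages % (4 * n_sheets) != 0:
--             n_booklets += 1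
--
--     if type(n_booklets) is not int or n_booklets <= 0:
--         raise TypeError("number of booklets must be integer greater than 0")
--
--     n_sheets = n_pages // 4  # 4 pages per sheet, duplex printing
--     if n_pages % 4 != 0:
--         n_sheets += 1
--
--     if n_sheets < n_booklets:
--         raise ValueError("number of booklets must be less than or equal to the number of pages / 4")
--
--     sheets_per_booklet = n_sheets // n_booklets
--     sheets_left = n_sheets % n_booklets
--
--     distrib = []
--     for _ in range(n_booklets):
--         if sheets_left > 0:
--             distrib.append(sheets_per_booklet + 1)
--             sheets_left -= 1
--         else:
--             distrib.append(sheets_per_booklet)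
--
--     distrib_begin_end = []
--     begin = 0
--     for n_sheets in distrib:
--         end = min(begin + n_sheets * 4 - 1, n_pages - 1)
--         distrib_begin_end.append((begin, end))
--         begin = end + 1
--
--     return distrib_begin_end
-- ===== SOURCE B (Python) =====
-- def distribution_booklets(n_pages, n_booklets="auto", n_sheets=7):
--     """
--     Defines which pages go in which booklet.
--     """
--     if type(n_pages) is not int or n_pages <= 0:
--         raise TypeError("number of pages must be integer greater than 0")
--
--     if n_booklets == "auto":
--         if n_pages // (4 * n_sheets) == 0:
--             raise ValueError("Too many sheets")
--         n_booklets = -(-n_pages // (4 * n_sheets))  # ceiling division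
--
--     if type(n_booklets) is not int or n_booklets <= 0:
--         raise TypeError("number of booklets must be integer greater than 0")
--
--     sheets = -(-n_pages // 4)  # ceil(n_pages / 4)
--     if sheets < n_booklets:
--         raise ValueError("number of booklets must be less than or equal to the number of pages / 4")
--
--     q, r = divmod(sheets, n_booklets)
--
--     def cum(k):  # sheets assigned to the first k booklets
--         return k * q + min(k, r)
--
--     return [(4 * cum(i), min(4 * cum(i + 1) - 1, n_pages - 1))
--             for i in range(n_booklets)]
-- ===== Notes on version B (the rewrite author's own statement) =====
-- stated objective: alternative
-- what changed: Replaces A's two-pass build-a-sheet-table-then-accumulate-begins construction by a single index-driven pass that computes each booklet's page range from the closed-form cumulative sheet count cum(k)=k*q+min(k,r), with ceiling divisions replacing A's floordiv-plus-remainder adjustments; B reproduces A exactly, including the explicit-integer n_booklets path in Python (that path passes a non-String n_booklets and so lies outside the ported String-typed signature).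
import Mathlib
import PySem

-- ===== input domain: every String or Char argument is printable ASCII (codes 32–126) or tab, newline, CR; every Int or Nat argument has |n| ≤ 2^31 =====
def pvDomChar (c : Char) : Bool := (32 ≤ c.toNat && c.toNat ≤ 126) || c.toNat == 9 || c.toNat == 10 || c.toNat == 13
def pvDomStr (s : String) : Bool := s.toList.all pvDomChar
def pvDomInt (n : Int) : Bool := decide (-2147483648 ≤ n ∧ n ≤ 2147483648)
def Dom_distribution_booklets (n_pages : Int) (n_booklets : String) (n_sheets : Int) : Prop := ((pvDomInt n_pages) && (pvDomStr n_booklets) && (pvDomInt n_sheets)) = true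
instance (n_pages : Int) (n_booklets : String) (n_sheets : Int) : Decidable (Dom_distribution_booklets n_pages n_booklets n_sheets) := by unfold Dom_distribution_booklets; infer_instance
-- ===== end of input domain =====

-- B replaces A's two passes (build a per-booklet sheet table, then accumulate begins)
-- by one index-driven pass using the closed-form cumulative sheet count; objective: alternative.
-- (Source B also matches A on the Python-only explicit-integer n_booklets path, which the fixed
-- port signature n_booklets : String cannot represent.)

-- ===== PORT A =====
-- Literal transliteration of A under the given signature (n_booklets : String).  Branches
-- returning [] mark exactly the inputs where the Python raises (TypeError on any string
-- other than "auto" — a string never passes `type(n_booklets) is int` — ZeroDivisionError,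
-- ValueError); Pre_ excludes all of them.
def distribution_booklets (n_pages : Int) (n_booklets : String) (n_sheets : Int) : List (Int × Int) :=
  if n_pages ≤ 0 then []                           -- raise TypeError
  else if n_booklets ≠ "auto" then []              -- n_booklets stays a str → TypeError below
  else if 4 * n_sheets = 0 then []                 -- ZeroDivisionError
  else
    let nb0 := PySem.Int.floordiv n_pages (4 * n_sheets)
    if nb0 = 0 then []                             -- raise ValueError "Too many sheets"
    else
      let nb := if PySem.Int.mod n_pages (4 * n_sheets) ≠ 0 then nb0 + 1 else nb0
      if nb ≤ 0 then []                            -- raise TypeError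
      else
        let ns0 := PySem.Int.floordiv n_pages 4
        let ns := if PySem.Int.mod n_pages 4 ≠ 0 then ns0 + 1 else ns0
        if ns < nb then []                         -- raise ValueError
        else
          let spb := PySem.Int.floordiv ns nb
          let distrib := ((PySem.List.pyRange 0 nb 1).foldl
            (fun (st : List Int × Int) _ =>
              if st.2 > 0 then (st.1 ++ [spb + 1], st.2 - 1) else (st.1 ++ [spb], st.2))
            ([], PySem.Int.mod ns nb)).1
          (distrib.foldl
            (fun (st : List (Int × Int) × Int) d =>
              let e := min (st.2 + d * 4 - 1) (n_pages - 1)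
              (st.1 ++ [(st.2, e)], e + 1))
            ([], 0)).1

-- ===== PORT B =====
-- helper of Source B: sheets assigned to the first k booklets
def dbCum (q r k : Int) : Int := k * q + min k r

def distribution_booklets_alt (n_pages : Int) (n_booklets : String) (n_sheets : Int) : List (Int × Int) :=
  if n_pages ≤ 0 then []                           -- raise TypeError
  else if n_booklets ≠ "auto" then []              -- n_booklets stays a str → TypeError below
  else if 4 * n_sheets = 0 then []                 -- ZeroDivisionError
  else if PySem.Int.floordiv n_pages (4 * n_sheets) = 0 then []   -- raise ValueError
  else
    let nb := -(PySem.Int.floordiv (-n_pages) (4 * n_sheets))     -- ceiling division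
    if nb ≤ 0 then []                              -- raise TypeError
    else
      let sheets := -(PySem.Int.floordiv (-n_pages) 4)            -- ceil(n_pages / 4)
      if sheets < nb then []                       -- raise ValueError
      else
        let q := PySem.Int.floordiv sheets nb
        let r := PySem.Int.mod sheets nb
        (PySem.List.pyRange 0 nb 1).map
          (fun i => (4 * dbCum q r i, min (4 * dbCum q r (i + 1) - 1) (n_pages - 1)))

-- ===== PRECONDITION & SPEC =====
-- Under the port's fixed signature n_booklets is a String, and the Python A raises on every
-- String-typed input outside Pre_: TypeError for any string other than "auto" (a string never
-- satisfies `type(n_booklets) is int`), and TypeError / ZeroDivisionError / ValueError when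
-- n_pages ≤ 0, n_sheets ≤ 0 or 4*n_sheets > n_pages.  So Pre_ excludes only raising inputs;
-- the explicit-integer n_booklets path of the Python (where A also returns, and Source B matches
-- it) is outside the ported type and outside this claim.
def Pre_distribution_booklets (n_pages : Int) (n_booklets : String) (n_sheets : Int) : Prop :=
  1 ≤ n_pages ∧ n_booklets = "auto" ∧ 1 ≤ n_sheets ∧ 4 * n_sheets ≤ n_pages
instance (n_pages : Int) (n_booklets : String) (n_sheets : Int) : Decidable (Pre_distribution_booklets n_pages n_booklets n_sheets) := by unfold Pre_distribution_booklets; infer_instance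

def pvWitness_distribution_booklets : Int × String × Int := (30, "auto", 2)

def Spec_distribution_booklets (n_pages : Int) (n_booklets : String) (n_sheets : Int) (out : List (Int × Int)) : Prop := out = distribution_booklets_alt n_pages n_booklets n_sheets
instance (n_pages : Int) (n_booklets : String) (n_sheets : Int) (out : List (Int × Int)) : Decidable (Spec_distribution_booklets n_pages n_booklets n_sheets out) := by unfold Spec_distribution_booklets; infer_instance

-- ===== CLAIM (what is proved, stated in full; the proofs are below) =====
def Claim_equal_distribution_booklets : Prop := ∀ (n_pages : Int) (n_booklets : String) (n_sheets : Int), Dom_distribution_booklets n_pages n_booklets n_sheets → Pre_distribution_booklets n_pages n_booklets n_sheets → Spec_distribution_booklets n_pages n_booklets n_sheets (distribution_booklets n_pages n_booklets n_sheets)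

-- ===== LEMMAS AND PROOFS =====

-- ceiling division -((-a) // b) equals floor division plus the remainder adjustment
lemma ceil_eq_floordiv_adjust (a b : Int) (hb : 0 < b) :
    -(PySem.Int.floordiv (-a) b)
      = (if PySem.Int.mod a b ≠ 0 then PySem.Int.floordiv a b + 1 else PySem.Int.floordiv a b) := by
  have hsum := PySem.Int.floordiv_mul_add_mod a b
  have hm0 := PySem.Int.mod_nonneg a hb
  have hmlt := PySem.Int.mod_lt a hb
  by_cases h : PySem.Int.mod a b = 0
  · rw [if_neg (by simp [h])]
    rw [PySem.Int.neg_floordiv_neg_eq_iff_of_pos hb]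
    constructor <;> nlinarith
  · rw [if_pos h]
    have h1 : 0 < PySem.Int.mod a b := lt_of_le_of_ne hm0 (Ne.symm h)
    rw [PySem.Int.neg_floordiv_neg_eq_iff_of_pos hb]
    constructor <;> nlinarith

-- A's first loop: the per-booklet sheet table is q+1 for the first sl booklets, q after
lemma distrib_loop_eq (q : Int) :
    ∀ (n : Nat) (d : List Int) (sl : Int), 0 ≤ sl →
    (List.range n).foldl
        (fun (st : List Int × Int) _ =>
          if st.2 > 0 then (st.1 ++ [q + 1], st.2 - 1) else (st.1 ++ [q], st.2)) (d, sl)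
      = (d ++ (List.range n).map (fun (i : Nat) => if (i : Int) < sl then q + 1 else q),
         sl - min (n : Int) sl) := by
  intro n
  induction n with
  | zero => intro d sl h; simp; omega
  | succ n ih =>
    intro d sl h
    rw [List.range_succ, List.foldl_append, ih d sl h, List.map_append, List.foldl_cons,
        List.foldl_nil, List.map_cons, List.map_nil]
    by_cases hn : (n : Int) < sl
    · rw [if_pos (by omega), if_pos hn, Prod.mk.injEq]
      refine ⟨by rw [List.append_assoc], by push_cast; omega⟩
    · rw [if_neg (by omega), if_neg hn, Prod.mk.injEq]
      refine ⟨by rw [List.append_assoc], by push_cast; omega⟩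

-- A's second loop over that table, from begin = 0, produces the closed-form ranges,
-- provided every proper cumulative page count stays below n_pages.
lemma ranges_loop_eq (p q r : Int) (n : Nat) (hr : 0 ≤ r) (hp : 1 ≤ p)
    (hcum : ∀ m : Nat, m < n → 4 * dbCum q r (m : Int) ≤ p - 1) :
    ∀ m : Nat, m ≤ n →
    ((List.range m).map (fun (i : Nat) => if (i : Int) < r then q + 1 else q)).foldl
        (fun (st : List (Int × Int) × Int) d =>
          (st.1 ++ [(st.2, min (st.2 + d * 4 - 1) (p - 1))],
           min (st.2 + d * 4 - 1) (p - 1) + 1)) ([], 0)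
      = ((List.range m).map
            (fun (i : Nat) => (4 * dbCum q r (i : Int), min (4 * dbCum q r ((i : Int) + 1) - 1) (p - 1))),
         min (4 * dbCum q r (m : Int)) p) := by
  intro m
  induction m with
  | zero => intro _; simp [dbCum]; omega
  | succ m ih =>
    intro hm
    rw [List.range_succ, List.map_append, List.foldl_append, ih (by omega),
        List.map_cons, List.map_nil, List.foldl_cons, List.foldl_nil, List.map_append,
        List.map_cons, List.map_nil]
    have hb : min (4 * dbCum q r (m : Int)) p = 4 * dbCum q r (m : Int) := by
      have := hcum m (by omega); omega
    have hstep : dbCum q r ((m : Int) + 1)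
        = dbCum q r (m : Int) + (if (m : Int) < r then q + 1 else q) := by
      unfold dbCum
      have hringq : ((m : Int) + 1) * q = (m : Int) * q + q := by ring
      by_cases h : (m : Int) < r
      · rw [if_pos h]; omega
      · rw [if_neg h]; omega
    rw [hb, Prod.mk.injEq]
    constructor
    · by_cases h : (m : Int) < r
      · rw [if_pos h] at hstep ⊢
        have hy : min (4 * dbCum q r (m : Int) + (q + 1) * 4 - 1) (p - 1)
            = min (4 * dbCum q r ((m : Int) + 1) - 1) (p - 1) := by omega
        rw [hy]
      · rw [if_neg h] at hstep ⊢
        have hy : min (4 * dbCum q r (m : Int) + q * 4 - 1) (p - 1)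
            = min (4 * dbCum q r ((m : Int) + 1) - 1) (p - 1) := by omega
        rw [hy]
    · push_cast
      by_cases h : (m : Int) < r
      · rw [if_pos h] at hstep ⊢; omega
      · rw [if_neg h] at hstep ⊢; omega

-- ===== VERDICT (by name: the statement is the Claim_ definition above) =====
theorem distribution_booklets_spec : Claim_equal_distribution_booklets := by
  intro p nbs s _ hpre
  obtain ⟨hp, hauto, hs, hps⟩ := hpre
  subst hauto
  unfold Spec_distribution_booklets
  have hb4s : (0 : Int) < 4 * s := by omega
  have hfd1 : (1 : Int) ≤ PySem.Int.floordiv p (4 * s) :=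
    (PySem.Int.le_floordiv_iff_mul_le hb4s).mpr (by omega)
  -- booklet and sheet counts, in A's floordiv-plus-adjust form
  set nbA : Int := if PySem.Int.mod p (4 * s) ≠ 0 then PySem.Int.floordiv p (4 * s) + 1
                   else PySem.Int.floordiv p (4 * s) with hnbA
  set nsA : Int := if PySem.Int.mod p 4 ≠ 0 then PySem.Int.floordiv p 4
                   + 1 else PySem.Int.floordiv p 4 with hnsA
  have hceil1 : -(PySem.Int.floordiv (-p) (4 * s)) = nbA := ceil_eq_floordiv_adjust p (4 * s) hb4s
  have hceil2 : -(PySem.Int.floordiv (-p) 4) = nsA := ceil_eq_floordiv_adjust p 4 (by omega)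
  have hnb1 : 1 ≤ nbA := by rw [hnbA]; split <;> omega
  have hbr1 : (nbA - 1) * (4 * s) < p ∧ p ≤ nbA * (4 * s) :=
    (PySem.Int.neg_floordiv_neg_eq_iff_of_pos hb4s).mp hceil1
  have hbr2 : (nsA - 1) * 4 < p ∧ p ≤ nsA * 4 :=
    (PySem.Int.neg_floordiv_neg_eq_iff_of_pos (by omega : (0:Int) < 4)).mp hceil2
  have hnble : nbA ≤ nsA := by nlinarith [hbr1.1, hbr2.2, mul_nonneg (by omega : (0:Int) ≤ nbA - 1) (by omega : (0:Int) ≤ 4 * s - 4)]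
  -- reduce both ports past their guards
  simp only [distribution_booklets, distribution_booklets_alt, hceil1, hceil2,
    if_neg (show ¬ p ≤ 0 by omega), if_neg (show ¬ ("auto" : String) ≠ "auto" by simp),
    if_neg (show ¬ (4 * s = 0) by omega),
    if_neg (show ¬ PySem.Int.floordiv p (4 * s) = 0 by omega), ← hnbA, ← hnsA,
    if_neg (show ¬ nbA ≤ 0 by omega), if_neg (show ¬ nsA < nbA by omega)]
  -- the division of sheets among booklets
  set q : Int := PySem.Int.floordiv nsA nbA with hq
  set r : Int := PySem.Int.mod nsA nbA with hr
  have hq1 : 1 ≤ q := (PySem.Int.le_floordiv_iff_mul_le (by omega)).mpr (by omega)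
  have hsum : q * nbA + r = nsA := PySem.Int.floordiv_mul_add_mod nsA nbA
  have hr0 : 0 ≤ r := PySem.Int.mod_nonneg nsA (by omega)
  have hrlt : r < nbA := PySem.Int.mod_lt nsA (by omega)
  -- switch the iteration range to List.range nbA.toNat
  have hnbt : ((nbA.toNat : Nat) : Int) = nbA := Int.toNat_of_nonneg (by omega)
  have hcum : ∀ m : Nat, m < nbA.toNat → 4 * dbCum q r (m : Int) ≤ p - 1 := by
    intro m hm
    have hmlt : (m : Int) ≤ nbA - 1 := by omega
    have hmin1 : min (m : Int) r ≤ r := min_le_right _ _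
    unfold dbCum
    nlinarith [mul_nonneg (by omega : (0:Int) ≤ nbA - m) (by omega : (0:Int) ≤ q - 1), hbr2.1]
  rw [← hnbt, PySem.List.pyRange_zero_natCast]
  rw [List.foldl_map, distrib_loop_eq q nbA.toNat [] r hr0]
  simp only []
  rw [List.nil_append, List.map_map]
  rw [ranges_loop_eq p q r nbA.toNat hr0 (by omega) hcum nbA.toNat (le_refl _)]
  simp [dbCum]
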